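-- pv_equiv track=rewrite | github.com/choi-seoghwan/Python_Predict_Lotto | predict.py | removePongNums
-- ===== SOURCE A (Python) =====
-- def removePongNums(possible_nums):
--     c1 = {1,8,15,22,29,36,43,2,9,16,23,30,37,44,4,11,18,25,32,39,5,12,19,26,33,40}
--     c2 = {2,9,16,23,30,37,44,3,10,17,24,31,38,45,5,12,19,26,33,40,6,13,20,27,34,41}
--     c3 = {3,10,17,24,31,38,45,4,11,18,25,32,39,6,13,20,27,34,41,7,14,21,27,35,42}
--
--     pong1_list = [i for i in possible_nums if len(set(i).intersection(c1)) < 6]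
--     pong2_list = [i for i in pong1_list if len(set(i).intersection(c2)) < 6]
--     pong3_list = [i for i in pong2_list if len(set(i).intersection(c3)) < 6]
--     return pong3_list
-- ===== SOURCE B (Python) =====
-- def removePongNums(possible_nums):
--     L1 = [1,8,15,22,29,36,43,2,9,16,23,30,37,44,4,11,18,25,32,39,5,12,19,26,33,40]
--     L2 = [2,9,16,23,30,37,44,3,10,17,24,31,38,45,5,12,19,26,33,40,6,13,20,27,34,41]
--     L3 = [3,10,17,24,31,38,45,4,11,18,25,32,39,6,13,20,27,34,41,7,14,21,27,35,42]
--     # Precompute one lookup table: number -> (in c1, in c2, in c3) as 0/1 flags.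
--     mask = {}
--     for n in L1:
--         mask[n] = (1, 0, 0)
--     for n in L2:
--         a, _, _ = mask.get(n, (0, 0, 0))
--         mask[n] = (a, 1, 0)
--     for n in L3:
--         a, b, _ = mask.get(n, (0, 0, 0))
--         mask[n] = (a, b, 1)
--     result = []
--     for i in possible_nums:
--         seen = set()
--         x = y = z = 0
--         for n in i:
--             if n not in seen:
--                 seen.add(n)
--                 a, b, c = mask.get(n, (0, 0, 0))
--                 x += a; y += b; z += c
--         if x < 6 and y < 6 and z < 6:
--             result.append(i)
--     return result
-- ===== Notes on version B (the rewrite author's own statement) =====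
-- stated objective: alternative
-- what changed: Replaces the three chained filtering passes, each building set(i) and intersecting it with a constant set, by a number->(flag,flag,flag) lookup table built once plus a single deduplicating counting scan per candidate list: no set intersections and no intermediate lists; same asymptotic cost.
import Mathlib
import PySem

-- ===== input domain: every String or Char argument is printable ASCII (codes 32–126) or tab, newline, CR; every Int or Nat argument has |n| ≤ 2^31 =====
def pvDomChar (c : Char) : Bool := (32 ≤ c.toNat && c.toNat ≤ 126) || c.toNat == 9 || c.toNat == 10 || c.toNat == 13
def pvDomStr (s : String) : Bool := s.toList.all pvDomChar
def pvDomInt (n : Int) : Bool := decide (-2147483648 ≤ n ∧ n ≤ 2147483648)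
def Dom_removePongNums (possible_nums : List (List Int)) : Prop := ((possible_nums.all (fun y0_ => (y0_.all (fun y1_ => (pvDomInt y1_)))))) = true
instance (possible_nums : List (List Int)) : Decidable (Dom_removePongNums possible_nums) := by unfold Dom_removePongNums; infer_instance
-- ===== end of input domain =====

-- B replaces A's three filtering passes with three set intersections by a precomputed
-- number -> (flag,flag,flag) lookup table and one deduplicating counting scan per element
-- (objective: alternative algorithm/data structure; same asymptotic cost).

-- ===== PORT A =====
-- the three constant pattern sets (Python set literals, insertion order)
def pvC1 : PySem.Set Int :=
  PySem.Set.ofList [1,8,15,22,29,36,43,2,9,16,23,30,37,44,4,11,18,25,32,39,5,12,19,26,33,40]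
def pvC2 : PySem.Set Int :=
  PySem.Set.ofList [2,9,16,23,30,37,44,3,10,17,24,31,38,45,5,12,19,26,33,40,6,13,20,27,34,41]
def pvC3 : PySem.Set Int :=
  PySem.Set.ofList [3,10,17,24,31,38,45,4,11,18,25,32,39,6,13,20,27,34,41,7,14,21,27,35,42]

def removePongNums (possible_nums : List (List Int)) : List (List Int) :=
  let pong1_list := possible_nums.filter
    (fun i => decide ((PySem.Set.inter (PySem.Set.ofList i) pvC1).length < 6))
  let pong2_list := pong1_list.filter
    (fun i => decide ((PySem.Set.inter (PySem.Set.ofList i) pvC2).length < 6))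
  let pong3_list := pong2_list.filter
    (fun i => decide ((PySem.Set.inter (PySem.Set.ofList i) pvC3).length < 6))
  pong3_list

-- ===== PORT B =====
def pvL1 : List Int := [1,8,15,22,29,36,43,2,9,16,23,30,37,44,4,11,18,25,32,39,5,12,19,26,33,40]
def pvL2 : List Int := [2,9,16,23,30,37,44,3,10,17,24,31,38,45,5,12,19,26,33,40,6,13,20,27,34,41]
def pvL3 : List Int := [3,10,17,24,31,38,45,4,11,18,25,32,39,6,13,20,27,34,41,7,14,21,27,35,42]

-- the lookup table: number -> (in c1, in c2, in c3) as 0/1 flags, built once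
def pvMask : PySem.Dict Int (Int × Int × Int) :=
  let m1 := pvL1.foldl (fun m n => m.insert n (1, 0, 0)) PySem.Dict.empty
  let m2 := pvL2.foldl (fun m n =>
    let t := m.getD n (0, 0, 0); m.insert n (t.1, 1, 0)) m1
  pvL3.foldl (fun m n =>
    let t := m.getD n (0, 0, 0); m.insert n (t.1, t.2.1, 1)) m2

-- the inner loop of B: deduplicating counting scan over one candidate list
def pvCounts (i : List Int) : PySem.Set Int × Int × Int × Int :=
  i.foldl (fun st n =>
    if st.1.contains n then st
    else
      let t := pvMask.getD n (0, 0, 0)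
      (st.1.add n, st.2.1 + t.1, st.2.2.1 + t.2.1, st.2.2.2 + t.2.2))
    (PySem.Set.empty, 0, 0, 0)

def removePongNums_alt (possible_nums : List (List Int)) : List (List Int) :=
  possible_nums.foldl (fun result i =>
    let st := pvCounts i
    if st.2.1 < 6 ∧ st.2.2.1 < 6 ∧ st.2.2.2 < 6 then result ++ [i] else result) []

-- ===== PRECONDITION & SPEC =====
def Spec_removePongNums (possible_nums : List (List Int)) (out : List (List Int)) : Prop := out = removePongNums_alt possible_nums
instance (possible_nums : List (List Int)) (out : List (List Int)) : Decidable (Spec_removePongNums possible_nums out) := by unfold Spec_removePongNums; infer_instance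

-- ===== CLAIM =====
def Claim_equal_removePongNums : Prop := ∀ (possible_nums : List (List Int)), Dom_removePongNums possible_nums → Spec_removePongNums possible_nums (removePongNums possible_nums)

-- ===== LEMMAS AND PROOFS =====
def pvMemb (L : List Int) (n : Int) : Int := if n ∈ L then 1 else 0

theorem getD_foldl_insert_not_mem (L : List Int)
    (f : PySem.Dict Int (Int × Int × Int) → Int → (Int × Int × Int))
    (m : PySem.Dict Int (Int × Int × Int)) (n : Int) (h : n ∉ L) :
    (L.foldl (fun m k => m.insert k (f m k)) m).getD n (0, 0, 0) = m.getD n (0, 0, 0) := by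
  induction L generalizing m with
  | nil => rfl
  | cons a L ih =>
    simp only [List.mem_cons, not_or] at h
    simp only [List.foldl_cons]
    rw [ih _ h.2, PySem.Dict.getD_insert, if_neg h.1]

set_option maxRecDepth 100000 in
theorem pvMask_spec (n : Int) :
    pvMask.getD n (0, 0, 0) = (pvMemb pvL1 n, pvMemb pvL2 n, pvMemb pvL3 n) := by
  by_cases h : n ∈ pvL1 ++ pvL2 ++ pvL3
  · have key : ∀ m ∈ pvL1 ++ pvL2 ++ pvL3,
        pvMask.getD m (0, 0, 0) = (pvMemb pvL1 m, pvMemb pvL2 m, pvMemb pvL3 m) := by decide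
    exact key n h
  · simp only [List.mem_append, not_or] at h
    unfold pvMask
    rw [getD_foldl_insert_not_mem _ _ _ _ h.2,
        getD_foldl_insert_not_mem _ _ _ _ h.1.2,
        getD_foldl_insert_not_mem _ _ _ _ h.1.1]
    simp [pvMemb, h.1.1, h.1.2, h.2, PySem.Dict.getD, PySem.Dict.get?, PySem.Dict.empty]

def pvCnt (L : List Int) (s : List Int) : Int :=
  (s.countP (fun x => decide (x ∈ L)) : Nat)

theorem pvCnt_append_single (L : List Int) (s : List Int) (n : Int) :
    pvCnt L (s ++ [n]) = pvCnt L s + pvMemb L n := by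
  unfold pvCnt pvMemb
  rw [List.countP_append]
  by_cases h : n ∈ L <;> simp [h]

theorem pvCounts_inv (i : List Int) (seen : PySem.Set Int) (x y z : Int) :
    i.foldl (fun st n =>
      if st.1.contains n then st
      else
        let t := pvMask.getD n (0, 0, 0)
        (st.1.add n, st.2.1 + t.1, st.2.2.1 + t.2.1, st.2.2.2 + t.2.2))
      (seen, x, y, z) =
    (i.foldl PySem.Set.add seen,
     x + (pvCnt pvL1 (i.foldl PySem.Set.add seen) - pvCnt pvL1 seen),
     y + (pvCnt pvL2 (i.foldl PySem.Set.add seen) - pvCnt pvL2 seen),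
     z + (pvCnt pvL3 (i.foldl PySem.Set.add seen) - pvCnt pvL3 seen)) := by
  induction i generalizing seen x y z with
  | nil => simp
  | cons n t ih =>
    simp only [List.foldl_cons]
    by_cases h : seen.contains n
    · have hadd : seen.add n = seen := by unfold PySem.Set.add; rw [if_pos h]
      rw [if_pos h, hadd, ih]
    · rw [if_neg h]
      have hadd : seen.add n = seen ++ [n] := by unfold PySem.Set.add; rw [if_neg h]
      rw [ih, hadd, pvCnt_append_single, pvCnt_append_single, pvCnt_append_single]
      rw [pvMask_spec]
      refine Prod.ext rfl (Prod.ext ?_ (Prod.ext ?_ ?_)) <;> dsimp <;> ring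

theorem pvCounts_eq (i : List Int) :
    pvCounts i = (PySem.Set.ofList i,
      pvCnt pvL1 (PySem.Set.ofList i), pvCnt pvL2 (PySem.Set.ofList i),
      pvCnt pvL3 (PySem.Set.ofList i)) := by
  unfold pvCounts
  rw [pvCounts_inv]
  have : PySem.Set.ofList i = i.foldl PySem.Set.add PySem.Set.empty := rfl
  rw [← this]
  simp [pvCnt, PySem.Set.empty]

theorem inter_len (i : List Int) (L : List Int) :
    ((PySem.Set.inter (PySem.Set.ofList i) (PySem.Set.ofList L)).length : Int)
      = pvCnt L (PySem.Set.ofList i) := by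
  unfold pvCnt
  rw [PySem.Set.inter, ← List.countP_eq_length_filter]
  congr 1
  refine List.countP_congr (fun x _ => ?_)
  simp [PySem.Set.contains, PySem.Set.mem_ofList]

theorem cond_eq (i : List Int) :
    (((pvCounts i).2.1 < 6 ∧ (pvCounts i).2.2.1 < 6 ∧ (pvCounts i).2.2.2 < 6) ↔
     ((PySem.Set.inter (PySem.Set.ofList i) pvC1).length < 6 ∧
      (PySem.Set.inter (PySem.Set.ofList i) pvC2).length < 6 ∧
      (PySem.Set.inter (PySem.Set.ofList i) pvC3).length < 6)) := by
  rw [pvCounts_eq]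
  have h1 := inter_len i pvL1
  have h2 := inter_len i pvL2
  have h3 := inter_len i pvL3
  dsimp
  rw [show pvC1 = PySem.Set.ofList pvL1 from rfl, show pvC2 = PySem.Set.ofList pvL2 from rfl,
      show pvC3 = PySem.Set.ofList pvL3 from rfl]
  omega

theorem removePongNums_alt_eq (possible_nums : List (List Int)) :
    removePongNums_alt possible_nums = removePongNums possible_nums := by
  unfold removePongNums_alt removePongNums
  rw [PySem.List.foldl_append_ite_eq_filter]
  simp only [List.filter_filter, List.nil_append]
  refine List.filter_congr (fun i _ => ?_)
  have h := cond_eq i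
  simp only [← Bool.decide_and]
  exact decide_eq_decide.mpr (by tauto)

-- ===== VERDICT =====
theorem removePongNums_spec : Claim_equal_removePongNums := by
  intro possible_nums _
  unfold Spec_removePongNums
  exact (removePongNums_alt_eq possible_nums).symm
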